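-- pv_equiv track=rewrite | github.com/raphaelDuff/hf-ai-agent | app.py | _extract_answer_from_reasoning
-- ===== SOURCE A (Python) =====
-- def _extract_answer_from_reasoning(reasoning_text: str) -> str:
--     """Extract the final answer from Claude's reasoning"""
--     lines = reasoning_text.split("\n")
--
--     # Look for ANSWER: line
--     for line in lines:
--         if line.strip().startswith("ANSWER:"):
--             return line.split("ANSWER:", 1)[1].strip()
--
--     # Fallback: use last non-empty line
--     for line in reversed(lines):
--         if line.strip():
--             return line.strip()
--
--     return "Unable to determine answer"
-- ===== SOURCE B (Python) =====
-- def _extract_answer_from_reasoning(reasoning_text: str) -> str: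
--     """Extract the final answer from Claude's reasoning (single forward pass)."""
--     last = None
--     for line in reasoning_text.split("\n"):
--         stripped = line.strip()
--         if stripped.startswith("ANSWER:"):
--             return line.split("ANSWER:", 1)[1].strip()
--         if stripped:
--             last = stripped
--     return last if last is not None else "Unable to determine answer"
-- ===== Notes on version B (the rewrite author's own statement) =====
-- stated objective: simpler
-- what changed: Replaces A's two sequential loops (forward ANSWER scan, then a second scan over the reversed lines for the fallback) with one forward pass that remembers the most recent non-empty stripped line.
import Mathlib
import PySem

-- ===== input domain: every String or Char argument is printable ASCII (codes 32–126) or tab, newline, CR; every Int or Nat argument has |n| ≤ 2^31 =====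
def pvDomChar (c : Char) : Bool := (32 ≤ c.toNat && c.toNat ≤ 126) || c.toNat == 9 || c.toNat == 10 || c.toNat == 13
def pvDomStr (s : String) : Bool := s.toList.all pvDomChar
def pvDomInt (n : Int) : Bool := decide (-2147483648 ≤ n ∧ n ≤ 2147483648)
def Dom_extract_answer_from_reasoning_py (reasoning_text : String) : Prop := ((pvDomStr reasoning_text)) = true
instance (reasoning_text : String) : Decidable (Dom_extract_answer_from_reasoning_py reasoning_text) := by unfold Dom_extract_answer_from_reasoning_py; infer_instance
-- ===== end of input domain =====

-- B replaces A's two sequential loops with one forward pass remembering the last non-empty stripped line (objective: simpler).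

-- ===== PORT A =====
-- what line.split("ANSWER:", 1)[1].strip() computes (the [1] exists whenever the guard held)
def pvExtractAfterAnswer (line : String) : String :=
  PySem.Str.strip ((PySem.List.pyGet? ((PySem.Str.splitMax? line "ANSWER:" 1).getD []) 1).getD "")

-- first loop: 'for line in lines: if line.strip().startswith("ANSWER:"): return …'
def pvA_loop1 : List String → Option String
  | [] => none
  | l :: ls =>
    if PySem.Str.startswith (PySem.Str.strip l) "ANSWER:" then some (pvExtractAfterAnswer l)
    else pvA_loop1 ls

-- second loop: 'for line in reversed(lines): if line.strip(): return line.strip()' (applied to lines.reverse)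
def pvA_loop2 : List String → Option String
  | [] => none
  | l :: ls =>
    if PySem.Str.strip l ≠ "" then some (PySem.Str.strip l)
    else pvA_loop2 ls

def extract_answer_from_reasoning_py (reasoning_text : String) : String :=
  let lines := (PySem.Str.split? reasoning_text "\n").getD []
  match pvA_loop1 lines with
  | some r => r
  | none =>
    match pvA_loop2 lines.reverse with
    | some r => r
    | none => "Unable to determine answer"

-- ===== PORT B =====
-- one forward pass; 'last' holds the most recent non-empty stripped line
def pvB_go : List String → Option String → String
  | [], last => last.getD "Unable to determine answer"
  | l :: ls, last =>
    let stripped := PySem.Str.strip l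
    if PySem.Str.startswith stripped "ANSWER:" then pvExtractAfterAnswer l
    else if stripped ≠ "" then pvB_go ls (some stripped)
    else pvB_go ls last

def extract_answer_from_reasoning_py_alt (reasoning_text : String) : String :=
  pvB_go ((PySem.Str.split? reasoning_text "\n").getD []) none

-- ===== PRECONDITION & SPEC =====
def Spec_extract_answer_from_reasoning_py (reasoning_text : String) (out : String) : Prop := out = extract_answer_from_reasoning_py_alt reasoning_text
instance (reasoning_text : String) (out : String) : Decidable (Spec_extract_answer_from_reasoning_py reasoning_text out) := by unfold Spec_extract_answer_from_reasoning_py; infer_instance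

-- ===== CLAIM (what is proved, stated in full; the proofs are below) =====
def Claim_equal_extract_answer_from_reasoning_py : Prop := ∀ (reasoning_text : String), Dom_extract_answer_from_reasoning_py reasoning_text → Spec_extract_answer_from_reasoning_py reasoning_text (extract_answer_from_reasoning_py reasoning_text)

-- ===== LEMMAS AND PROOFS =====
theorem pvA_loop2_append (xs ys : List String) :
    pvA_loop2 (xs ++ ys) = (pvA_loop2 xs).or (pvA_loop2 ys) := by
  induction xs with
  | nil => simp [pvA_loop2]
  | cons l ls ih =>
    simp only [List.cons_append, pvA_loop2]
    split <;> simp [ih]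

theorem pvB_go_eq (ls : List String) (last : Option String) :
    pvB_go ls last =
      match pvA_loop1 ls with
      | some r => r
      | none => ((pvA_loop2 ls.reverse).or last).getD "Unable to determine answer" := by
  induction ls generalizing last with
  | nil => simp [pvB_go, pvA_loop1, pvA_loop2]
  | cons l ls ih =>
    simp only [pvB_go, pvA_loop1, List.reverse_cons, pvA_loop2_append]
    split_ifs with hg hs
    · rfl
    · rw [ih]
      cases pvA_loop1 ls with
      | some r => rfl
      | none => simp [pvA_loop2, hs]
    · rw [ih]
      cases pvA_loop1 ls with
      | some r => rfl
      | none => simp [pvA_loop2, hs]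

theorem pv_main (ls : List String) :
    (match pvA_loop1 ls with
     | some r => r
     | none =>
       match pvA_loop2 ls.reverse with
       | some r => r
       | none => "Unable to determine answer") = pvB_go ls none := by
  rw [pvB_go_eq]
  cases pvA_loop1 ls with
  | some r => rfl
  | none => cases pvA_loop2 ls.reverse <;> rfl

-- ===== VERDICT (by name: the statement is the Claim_ definition above) =====
theorem extract_answer_from_reasoning_py_spec : Claim_equal_extract_answer_from_reasoning_py := by
  intro t _
  exact pv_main ((PySem.Str.split? t "\n").getD [])
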